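-- pv_equiv track=rewrite | github.com/wlanboy/wlanboy.github.io | generate.py | extract_title_and_paragraph
-- ===== SOURCE A (Python) =====
-- def extract_title_and_paragraph(content: str):
--     """
--     Liefert (title, description):
--     - title: erster Markdown-Heading (#, ##, ### …)
--     - description: erster nicht-leerer Paragraph nach diesem Heading
--     """
--     lines = content.splitlines()
--
--     title = None
--     title_idx = None
--
--     # 1. ersten Heading finden
--     for idx, line in enumerate(lines):
--         stripped = line.strip()
--         if stripped.startswith("#"):
--             candidate = stripped.lstrip("#").strip()
--             if candidate:
--                 title = candidate
--                 title_idx = idx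
--                 break
--
--     if title is None or title_idx is None:
--         return None, None
--
--     # 2. ab der Zeile nach dem Heading den ersten nicht-leeren Paragraphen suchen
--     paragraph_lines = []
--     in_paragraph = False
--
--     in_code_block = False
--
--     for line in lines[title_idx + 1:]:
--         stripped = line.strip()
--
--         # Codeblöcke überspringen
--         if stripped.startswith("```"):
--             in_code_block = not in_code_block
--             if in_paragraph:
--                 break
--             continue
--
--         if in_code_block:
--             continue
--
--         # Absatztrenner: komplett leere Zeile
--         if stripped == "":
--             if in_paragraph:
--                 break
--             else:
--                 continue
--
--         # Headings überspringen
--         if stripped.startswith("#"):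
--             if in_paragraph:
--                 break
--             continue
--
--         # Start eines Paragraphen
--         if not in_paragraph:
--             in_paragraph = True
--
--         paragraph_lines.append(line)
--
--     description = None
--     if paragraph_lines:
--         # Mehrere Zeilen zu einem Paragraphen zusammenführen und trimmen
--         description = " ".join(line.strip() for line in paragraph_lines).strip()
--
--     return title, description
-- ===== SOURCE B (Python) =====
-- def extract_title_and_paragraph(content: str):
--     # Single pass over the lines with an explicit 3-state machine instead of
--     # A's two sequential loops; collects already-stripped paragraph parts.
--     SEEK_TITLE, SEEK_PARA, IN_PARA = 0, 1, 2
--     state = SEEK_TITLE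
--     title = None
--     in_code = False
--     parts = []
--     for line in content.splitlines():
--         s = line.strip()
--         if state == SEEK_TITLE:
--             if s.startswith("#"):
--                 cand = s.lstrip("#").strip()
--                 if cand:
--                     title = cand
--                     state = SEEK_PARA
--             continue
--         if s.startswith("```"):
--             if state == IN_PARA:
--                 break
--             in_code = not in_code
--             continue
--         if in_code:
--             continue
--         if s == "" or s.startswith("#"):
--             if state == IN_PARA:
--                 break
--             continue
--         state = IN_PARA
--         parts.append(s)
--     if title is None:
--         return None, None
--     desc = " ".join(parts).strip() if parts else None
--     return title, desc
-- ===== Notes on version B (the rewrite author's own statement) =====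
-- stated objective: simpler
-- what changed: Replaced A's two sequential loops (find-title pass, then a second scan over the tail slice) by one single pass over the lines driven by an explicit three-state machine that collects already-stripped paragraph parts.
import Mathlib
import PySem

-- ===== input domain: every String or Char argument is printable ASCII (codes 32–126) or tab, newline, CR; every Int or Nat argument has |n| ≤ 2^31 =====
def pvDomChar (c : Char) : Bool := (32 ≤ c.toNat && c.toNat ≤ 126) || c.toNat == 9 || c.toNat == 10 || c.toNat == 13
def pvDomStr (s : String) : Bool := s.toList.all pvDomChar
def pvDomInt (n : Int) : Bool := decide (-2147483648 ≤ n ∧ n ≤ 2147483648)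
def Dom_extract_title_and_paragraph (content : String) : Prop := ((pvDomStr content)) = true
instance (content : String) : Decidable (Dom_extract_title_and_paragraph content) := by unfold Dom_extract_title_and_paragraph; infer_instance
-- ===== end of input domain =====

-- B replaces A's two sequential loops by one single-pass three-state machine over the lines (same cost, different decomposition).


-- ===== PORT A =====
-- phase 1 of A: find the first heading, returning the candidate title and the lines after it
-- (A records title_idx and slices lines[title_idx+1:]; the recursion returns that tail directly)
-- 's.lstrip("#")' is ported as 'dropWhile (· == '#')' (exact: lstrip with a one-char set)
def pvFindTitleA : List (List Char) → Option (List Char × List (List Char))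
  | [] => none
  | l :: ls =>
    let stripped := PySem.Chars.strip l
    if PySem.Chars.startswith stripped ['#'] then
      let candidate := PySem.Chars.strip (stripped.dropWhile (· == '#'))
      if candidate ≠ [] then some (candidate, ls) else pvFindTitleA ls
    else pvFindTitleA ls

-- phase 2 of A: the loop over lines[title_idx+1:] with state (paragraph_lines, in_paragraph, in_code_block)
def pvParaA : List (List Char) → List (List Char) → Bool → Bool → List (List Char)
  | [], acc, _, _ => acc
  | l :: ls, acc, inp, incode =>
    let stripped := PySem.Chars.strip l
    if PySem.Chars.startswith stripped ['`', '`', '`'] then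
      if inp then acc else pvParaA ls acc inp (!incode)
    else if incode then pvParaA ls acc inp incode
    else if stripped = [] then
      if inp then acc else pvParaA ls acc inp incode
    else if PySem.Chars.startswith stripped ['#'] then
      if inp then acc else pvParaA ls acc inp incode
    else pvParaA ls (acc ++ [l]) true incode

def extract_title_and_paragraph (content : String) : Option String × Option String :=
  let lines := (PySem.Str.splitlines content).map String.toList
  match pvFindTitleA lines with
  | none => (none, none)
  | some (title, rest) =>
    let paragraph_lines := pvParaA rest [] false false
    let description : Option String :=
      if paragraph_lines ≠ [] then
        some (String.ofList (PySem.Chars.strip (PySem.Chars.join [' '] (paragraph_lines.map PySem.Chars.strip))))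
      else none
    (some (String.ofList title), description)

-- ===== PORT B =====
inductive PvBState | seekTitle | seekPara | inPara
deriving DecidableEq, Repr

-- B: one pass, explicit state machine; parts holds already-stripped lines
def pvScanB : List (List Char) → PvBState → Option (List Char) → Bool → List (List Char) → Option (List Char) × List (List Char)
  | [], _, title, _, parts => (title, parts)
  | l :: ls, st, title, incode, parts =>
    let s := PySem.Chars.strip l
    if st = PvBState.seekTitle then
      if PySem.Chars.startswith s ['#'] then
        let cand := PySem.Chars.strip (s.dropWhile (· == '#'))
        if cand ≠ [] then pvScanB ls PvBState.seekPara (some cand) incode parts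
        else pvScanB ls PvBState.seekTitle title incode parts
      else pvScanB ls PvBState.seekTitle title incode parts
    else if PySem.Chars.startswith s ['`', '`', '`'] then
      if st = PvBState.inPara then (title, parts) else pvScanB ls st title (!incode) parts
    else if incode then pvScanB ls st title incode parts
    else if s = [] || PySem.Chars.startswith s ['#'] then
      if st = PvBState.inPara then (title, parts) else pvScanB ls st title incode parts
    else pvScanB ls PvBState.inPara title incode (parts ++ [s])

def extract_title_and_paragraph_alt (content : String) : Option String × Option String :=
  let lines := (PySem.Str.splitlines content).map String.toList
  match pvScanB lines PvBState.seekTitle none false [] with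
  | (none, _) => (none, none)
  | (some t, parts) =>
    let desc : Option String :=
      if parts ≠ [] then some (String.ofList (PySem.Chars.strip (PySem.Chars.join [' '] parts)))
      else none
    (some (String.ofList t), desc)

-- ===== PRECONDITION & SPEC =====
def Spec_extract_title_and_paragraph (content : String) (out : Option String × Option String) : Prop := out = extract_title_and_paragraph_alt content
instance (content : String) (out : Option String × Option String) : Decidable (Spec_extract_title_and_paragraph content out) := by unfold Spec_extract_title_and_paragraph; infer_instance

-- ===== CLAIM (what is proved, stated in full; the proofs are below) =====
def Claim_equal_extract_title_and_paragraph : Prop := ∀ (content : String), Dom_extract_title_and_paragraph content → Spec_extract_title_and_paragraph content (extract_title_and_paragraph content)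

-- ===== LEMMAS AND PROOFS =====

-- B's scan after the title is found computes the stripped image of A's paragraph accumulator
lemma pvScanB_para (t : List Char) :
    ∀ (ls acc : List (List Char)) (inp incode : Bool),
      pvScanB ls (if inp then PvBState.inPara else PvBState.seekPara) (some t) incode (acc.map PySem.Chars.strip)
        = (some t, (pvParaA ls acc inp incode).map PySem.Chars.strip) := by
  intro ls
  induction ls with
  | nil => intro acc inp incode; simp [pvScanB, pvParaA]
  | cons l ls ih =>
    intro acc inp incode
    simp only [pvScanB, pvParaA]
    have hst : (if inp then PvBState.inPara else PvBState.seekPara) ≠ PvBState.seekTitle := by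
      cases inp <;> simp
    have hin : ((if inp then PvBState.inPara else PvBState.seekPara) = PvBState.inPara) = (inp = true) := by
      cases inp <;> simp
    simp only [if_neg hst, hin]
    by_cases h1 : PySem.Chars.startswith (PySem.Chars.strip l) ['`', '`', '`']
    · simp only [h1, if_true]
      cases inp with
      | true => simp
      | false => simpa using ih acc false (!incode)
    · simp only [h1]
      by_cases h2 : incode
      · subst h2; simpa using ih acc inp true
      · simp only [Bool.not_eq_true] at h2; subst h2
        by_cases h3 : PySem.Chars.strip l = []
        · simp only [h3, decide_true, Bool.true_or, if_pos]
          cases inp with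
          | true => simp
          | false => simpa using ih acc false false
        · by_cases h4 : PySem.Chars.startswith (PySem.Chars.strip l) ['#']
          · simp only [h3, h4, decide_false, Bool.false_or, if_pos]
            cases inp with
            | true => simp
            | false => simpa using ih acc false false
          · have : (decide (PySem.Chars.strip l = []) || PySem.Chars.startswith (PySem.Chars.strip l) ['#']) = false := by
              simp [h3, h4]
            simp only [h3, h4, Bool.false_eq_true]
            have := ih (acc ++ [l]) true false
            simp only [List.map_append, List.map] at this
            simpa using this

-- B's scan while seeking the title agrees with A's phase 1
lemma pvScanB_title :
    ∀ (ls : List (List Char)) (incode : Bool),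
      pvScanB ls PvBState.seekTitle none incode []
        = match pvFindTitleA ls with
          | none => (none, [])
          | some (t, rest) => pvScanB rest PvBState.seekPara (some t) incode [] := by
  intro ls
  induction ls with
  | nil => intro incode; simp [pvScanB, pvFindTitleA]
  | cons l ls ih =>
    intro incode
    simp only [pvScanB, pvFindTitleA]
    by_cases h1 : PySem.Chars.startswith (PySem.Chars.strip l) ['#']
    · simp only [h1, if_true]
      by_cases h2 : PySem.Chars.strip ((PySem.Chars.strip l).dropWhile (· == '#')) ≠ []
      · simp [h2]
      · simp only [h2, if_false]
        simp only [not_not] at h2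
        simp [ih incode]
    · simp [h1, ih incode]

theorem pv_main (content : String) :
    extract_title_and_paragraph content = extract_title_and_paragraph_alt content := by
  unfold extract_title_and_paragraph extract_title_and_paragraph_alt
  simp only [pvScanB_title]
  cases h : pvFindTitleA ((PySem.Str.splitlines content).map String.toList) with
  | none => simp
  | some p =>
    obtain ⟨t, rest⟩ := p
    have h2 : pvScanB rest PvBState.seekPara (some t) false []
        = (some t, List.map PySem.Chars.strip (pvParaA rest [] false false)) := by
      simpa using pvScanB_para t rest [] false false
    simp only [h2]
    by_cases hp : pvParaA rest [] false false = [] <;> simp [hp]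

-- ===== VERDICT (by name: the statement is the Claim_ definition above) =====
theorem extract_title_and_paragraph_spec : Claim_equal_extract_title_and_paragraph := by
  intro content _
  unfold Spec_extract_title_and_paragraph
  exact pv_main content
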